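-- pv_equiv track=rewrite | github.com/SniperX-D/Python-Deep-Learning | matrix_mul2.py | matrix_mul2
-- ===== SOURCE A (Python) =====
-- def matrixmult (A, B):
-- 	res = []
-- 	for i in range(B.__len__()):
-- 		sum = 0
-- 		for j in range(B[i].__len__()):
-- 			sum += A[i][j] * B[i][j]
-- 		res.append(sum)
--
-- 	f_res = 0
-- 	for i in range(res.__len__()):
-- 		f_res += res[i]
--
-- 	return f_res
--
-- def matrix_mul2(A,B):
-- 	try:
-- 		res = []
-- 		for i in range(A.__len__() - B.__len__() + 1):
-- 			tmp_arr = []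
-- 			for j in range(A[i].__len__() - B[0].__len__() + 1):
-- 				cal_matrix = [] # matrix to calculate with B
-- 				for k in range(B.__len__()):
-- 					tmp = []
-- 					for h in range(B[k].__len__()):
-- 						tmp.append(A[i+k][j+h])
-- 					cal_matrix.append(tmp)
-- 				tmp_arr.append(matrixmult(cal_matrix, B))
--
-- 			res.append(tmp_arr)
--
-- 		return res
-- 	except():
-- 		return 0
-- ===== SOURCE B (Python) =====
-- def matrix_mul2(A, B):
--     # kernel-stationary accumulator: allocate the zero output grid once,
--     # then for each kernel entry B[k][h] add its contribution into every cell
--     if len(A) < len(B):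
--         return []
--     rows = len(A) - len(B) + 1
--     res = [[0] * max(len(A[i]) - len(B[0]) + 1, 0) for i in range(rows)]
--     for k in range(len(B)):
--         for h in range(len(B[k])):
--             b = B[k][h]
--             res = [[res[i][j] + b * A[i + k][j + h] for j in range(len(res[i]))]
--                    for i in range(rows)]
--     return res
-- ===== Notes on version B (the rewrite author's own statement) =====
-- stated objective: alternative
-- what changed: Replaces the per-cell submatrix extraction plus the matrixmult dot-product helper by a kernel-stationary accumulator: the zero output grid is allocated once from the shape, then each kernel entry B[k][h] is added into every output cell in one sweep.
import Mathlib
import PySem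

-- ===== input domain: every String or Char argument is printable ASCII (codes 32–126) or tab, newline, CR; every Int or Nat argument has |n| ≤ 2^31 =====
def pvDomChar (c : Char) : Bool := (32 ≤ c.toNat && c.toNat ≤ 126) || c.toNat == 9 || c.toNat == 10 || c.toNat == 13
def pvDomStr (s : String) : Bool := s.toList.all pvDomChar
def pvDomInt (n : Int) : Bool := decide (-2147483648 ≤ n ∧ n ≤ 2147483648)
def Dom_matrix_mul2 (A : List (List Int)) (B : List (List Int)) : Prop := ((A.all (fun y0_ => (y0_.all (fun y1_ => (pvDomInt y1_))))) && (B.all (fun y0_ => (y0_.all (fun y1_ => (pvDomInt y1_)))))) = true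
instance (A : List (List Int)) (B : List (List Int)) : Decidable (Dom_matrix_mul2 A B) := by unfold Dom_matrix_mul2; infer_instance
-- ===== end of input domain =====

-- B replaces the per-cell submatrix extraction + matrixmult helper by a kernel-stationary
-- accumulator grid (objective: alternative decomposition, same cost).

-- ===== PORT A =====
-- Python range(n) over a length is List.range; where the count involves '- len + 1' it may be
-- negative, so it is (… : Int).toNat, which is exactly Python's empty range for counts ≤ 0.
-- List accesses are getD with a default; inside Pre_ every access is in range, so this is exact
-- (outside Pre_ Python raises IndexError).
def matrixmult (A : List (List Int)) (B : List (List Int)) : Int :=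
  let res := (List.range B.length).foldl (fun res i =>
      res ++ [(List.range (B.getD i []).length).foldl
        (fun sum j => sum + (A.getD i []).getD j 0 * (B.getD i []).getD j 0) 0]) []
  (List.range res.length).foldl (fun f_res i => f_res + res.getD i 0) 0

def matrix_mul2 (A : List (List Int)) (B : List (List Int)) : List (List Int) :=
  (List.range ((A.length : Int) - B.length + 1).toNat).foldl (fun res i =>
    let tmp_arr := (List.range (((A.getD i []).length : Int) - (B.getD 0 []).length + 1).toNat).foldl
      (fun tmp_arr j =>
        let cal_matrix := (List.range B.length).foldl (fun cal_matrix k =>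
          let tmp := (List.range (B.getD k []).length).foldl
            (fun tmp h => tmp ++ [(A.getD (i + k) []).getD (j + h) 0]) []
          cal_matrix ++ [tmp]) []
        tmp_arr ++ [matrixmult cal_matrix B]) []
    res ++ [tmp_arr]) []

-- ===== PORT B =====
-- one kernel-entry sweep: res[i][j] + b * A[i+k][j+h] for every output cell
def pvStep (A : List (List Int)) (k h : Nat) (b : Int) (rows : Nat)
    (res : List (List Int)) : List (List Int) :=
  (List.range rows).map (fun i => (List.range (res.getD i []).length).map (fun j =>
    (res.getD i []).getD j 0 + b * (A.getD (i + k) []).getD (j + h) 0))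

-- '[0] * max(w, 0)' is List.replicate w.toNat 0 (Python list-repeat is empty for counts ≤ 0)
def matrix_mul2_alt (A : List (List Int)) (B : List (List Int)) : List (List Int) :=
  if A.length < B.length then []
  else
    let rows := A.length - B.length + 1
    let res0 := (List.range rows).map (fun i =>
      List.replicate (((A.getD i []).length : Int) - (B.getD 0 []).length + 1).toNat (0 : Int))
    (List.range B.length).foldl (fun res k =>
      (List.range (B.getD k []).length).foldl (fun res h =>
        pvStep A k h ((B.getD k []).getD h 0) rows res) res) res0

-- ===== PRECONDITION & SPEC =====
-- Pre_ excludes exactly the inputs where Python A raises IndexError: a nonempty output range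
-- with B == [] (the B[0] access), or a nonempty kernel row reaching past the end of a shorter
-- (ragged) row of A.
def Pre_matrix_mul2 (A : List (List Int)) (B : List (List Int)) : Prop :=
  B.length ≤ A.length →
    (B ≠ [] ∧ ∀ i < A.length - B.length + 1,
      (B.getD 0 []).length ≤ (A.getD i []).length →
        ∀ k < B.length, (B.getD k []) ≠ [] →
          (A.getD i []).length - (B.getD 0 []).length + (B.getD k []).length
            ≤ (A.getD (i + k) []).length)
instance (A : List (List Int)) (B : List (List Int)) : Decidable (Pre_matrix_mul2 A B) := by
  unfold Pre_matrix_mul2; infer_instance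

def pvWitness_matrix_mul2 : List (List Int) × List (List Int) :=
  ([[1, 2, 3], [4, 5, 6], [7, 8, 9]], [[1, 0], [0, -1]])

def Spec_matrix_mul2 (A : List (List Int)) (B : List (List Int)) (out : List (List Int)) : Prop := out = matrix_mul2_alt A B
instance (A : List (List Int)) (B : List (List Int)) (out : List (List Int)) : Decidable (Spec_matrix_mul2 A B out) := by unfold Spec_matrix_mul2; infer_instance

-- ===== CLAIM (what is proved, stated in full; the proofs are below) =====
def Claim_equal_matrix_mul2 : Prop := ∀ (A : List (List Int)) (B : List (List Int)), Dom_matrix_mul2 A B → Pre_matrix_mul2 A B → Spec_matrix_mul2 A B (matrix_mul2 A B)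

-- ===== LEMMAS AND PROOFS =====

-- the common shape: a grid with R rows, row i of width W i, cell (i,j) = g i j
def pvGrid (R : Nat) (W : Nat → Nat) (g : Nat → Nat → Int) : List (List Int) :=
  (List.range R).map (fun i => (List.range (W i)).map (g i))

theorem pvGrid_congr (R : Nat) (W : Nat → Nat) (g g' : Nat → Nat → Int)
    (hg : ∀ i j, g i j = g' i j) : pvGrid R W g = pvGrid R W g' := by
  unfold pvGrid
  exact List.map_congr_left (fun i _ => List.map_congr_left (fun j _ => hg i j))

theorem matrixmult_eq (C B : List (List Int)) :
    matrixmult C B =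
      ((List.range B.length).map (fun k =>
        ((List.range (B.getD k []).length).map (fun h =>
          (C.getD k []).getD h 0 * (B.getD k []).getD h 0)).sum)).sum := by
  unfold matrixmult
  rw [PySem.List.foldl_append_singleton_eq_map, List.nil_append,
      PySem.List.foldl_add, zero_add, List.length_map, List.length_range]
  refine congrArg List.sum (List.map_congr_left fun k hk => ?_)
  rw [List.mem_range] at hk
  rw [PySem.List.getD_map_range _ _ _ _ hk, PySem.List.foldl_add, zero_add]

-- A's result, cell by cell: each output cell is matrixmult of the extracted submatrix with B
theorem matrix_mul2_eq_grid (A B : List (List Int)) :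
    matrix_mul2 A B =
      pvGrid ((A.length : Int) - B.length + 1).toNat
        (fun i => (((A.getD i []).length : Int) - (B.getD 0 []).length + 1).toNat)
        (fun i j =>
          ((List.range B.length).map (fun k =>
            ((List.range (B.getD k []).length).map (fun h =>
              (A.getD (i + k) []).getD (j + h) 0 * (B.getD k []).getD h 0)).sum)).sum) := by
  unfold matrix_mul2 pvGrid
  simp only [PySem.List.foldl_append_singleton_eq_map, List.nil_append]
  refine List.map_congr_left fun i _ => ?_
  refine List.map_congr_left fun j _ => ?_
  rw [matrixmult_eq]
  refine congrArg List.sum (List.map_congr_left fun k hk => ?_)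
  rw [List.mem_range] at hk
  refine congrArg List.sum (List.map_congr_left fun h hh => ?_)
  rw [List.mem_range] at hh
  rw [PySem.List.getD_map_range _ _ _ _ hk, PySem.List.getD_map_range _ _ _ _ hh]

theorem pvStep_grid (A : List (List Int)) (k h : Nat) (b : Int) (R : Nat)
    (W : Nat → Nat) (g : Nat → Nat → Int) :
    pvStep A k h b R (pvGrid R W g) =
      pvGrid R W (fun i j => g i j + b * (A.getD (i + k) []).getD (j + h) 0) := by
  unfold pvStep pvGrid
  refine List.map_congr_left fun i hi => ?_
  rw [List.mem_range] at hi
  rw [PySem.List.getD_map_range _ _ _ _ hi]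
  simp only [List.length_map, List.length_range]
  refine List.map_congr_left fun j hj => ?_
  rw [List.mem_range] at hj
  rw [PySem.List.getD_map_range _ _ _ _ hj]

-- accumulator invariant, inner (h) loop
theorem foldH_grid (A : List (List Int)) (Bk : List Int) (k : Nat) (hs : List Nat)
    (R : Nat) (W : Nat → Nat) (g : Nat → Nat → Int) :
    hs.foldl (fun res h => pvStep A k h (Bk.getD h 0) R res) (pvGrid R W g) =
      pvGrid R W (fun i j =>
        g i j + (hs.map (fun h => Bk.getD h 0 * (A.getD (i + k) []).getD (j + h) 0)).sum) := by
  induction hs generalizing g with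
  | nil => simp [pvGrid]
  | cons h t ih =>
    rw [List.foldl_cons, pvStep_grid, ih]
    refine pvGrid_congr _ _ _ _ fun i j => ?_
    simp [add_assoc]

-- accumulator invariant, outer (k) loop
theorem foldK_grid (A B : List (List Int)) (ks : List Nat)
    (R : Nat) (W : Nat → Nat) (g : Nat → Nat → Int) :
    ks.foldl (fun res k =>
        (List.range (B.getD k []).length).foldl (fun res h =>
          pvStep A k h ((B.getD k []).getD h 0) R res) res) (pvGrid R W g) =
      pvGrid R W (fun i j =>
        g i j + (ks.map (fun k =>
          ((List.range (B.getD k []).length).map (fun h =>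
            (B.getD k []).getD h 0 * (A.getD (i + k) []).getD (j + h) 0)).sum)).sum) := by
  induction ks generalizing g with
  | nil => simp [pvGrid]
  | cons k t ih =>
    rw [List.foldl_cons, foldH_grid, ih]
    refine pvGrid_congr _ _ _ _ fun i j => ?_
    simp [add_assoc]

theorem matrix_mul2_alt_eq_grid (A B : List (List Int)) (hAB : ¬ A.length < B.length) :
    matrix_mul2_alt A B =
      pvGrid (A.length - B.length + 1)
        (fun i => (((A.getD i []).length : Int) - (B.getD 0 []).length + 1).toNat)
        (fun i j =>
          ((List.range B.length).map (fun k =>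
            ((List.range (B.getD k []).length).map (fun h =>
              (B.getD k []).getD h 0 * (A.getD (i + k) []).getD (j + h) 0)).sum)).sum) := by
  unfold matrix_mul2_alt
  rw [if_neg hAB]
  have h0 : ((List.range (A.length - B.length + 1)).map (fun i =>
      List.replicate (((A.getD i []).length : Int) - (B.getD 0 []).length + 1).toNat (0 : Int))) =
      pvGrid (A.length - B.length + 1)
        (fun i => (((A.getD i []).length : Int) - (B.getD 0 []).length + 1).toNat)
        (fun _ _ => 0) := by
    unfold pvGrid
    refine List.map_congr_left fun i _ => ?_
    rw [show (fun (_ : Nat) => (0 : Int)) = Function.const Nat (0 : Int) from rfl,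
        List.map_const, List.length_range]
  simp only [h0, foldK_grid]
  exact pvGrid_congr _ _ _ _ fun i j => by rw [zero_add]

-- ===== VERDICT (by name: the statement is the Claim_ definition above) =====
theorem matrix_mul2_spec : Claim_equal_matrix_mul2 := by
  intro A B _ _
  unfold Spec_matrix_mul2
  rw [matrix_mul2_eq_grid]
  by_cases hAB : A.length < B.length
  · have hR : ((A.length : Int) - B.length + 1).toNat = 0 := by omega
    rw [hR]
    unfold matrix_mul2_alt
    rw [if_pos hAB]
    simp [pvGrid]
  · rw [matrix_mul2_alt_eq_grid A B hAB]
    have hR : ((A.length : Int) - B.length + 1).toNat = A.length - B.length + 1 := by omega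
    rw [hR]
    refine pvGrid_congr _ _ _ _ fun i j => ?_
    refine congrArg List.sum (List.map_congr_left fun k _ => ?_)
    refine congrArg List.sum (List.map_congr_left fun h _ => mul_comm _ _)
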